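-- pv_equiv track=rewrite | github.com/BoyuGuan/TriFine | preProcessData/checkFilesDownloaded.py | findSuitableSubtitle
-- ===== SOURCE A (Python) =====
-- def findSuitableSubtitle(vttFilesAboutThisVideo, videoID, isEng):
--     ENSubtitilPriority = ['en', 'en-US', 'en-GB', 'en-CA', 'en-AU']
--     ZHSubtitilPriority = ['zh-CN', 'zh-Hans', 'zh', 'ZH-Hant', 'zh-HK', 'zh-TW']
--     subtitleFile = None
--     isHant = False
--
--     # 严格匹配
--     subtitlePriority = ENSubtitilPriority if isEng else ZHSubtitilPriority
--     for subIndex, subTail in enumerate(subtitlePriority):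
--         for file in vttFilesAboutThisVideo:
--             if f'{videoID}.{subTail}.vtt' in file:
--                 subtitleFile = file
--                 if not isEng and subIndex >= 3:
--                     isHant = True
--                 break
--         if subtitleFile is not None:
--             break
--
--     # 非严格匹配
--     if subtitleFile is None:
--         subtitleTail = 'en' if isEng else 'zh'
--         for file in vttFilesAboutThisVideo:
--             if f'{videoID}.{subtitleTail}' in file:
--                 subtitleFile = file
--                 if not isEng:
--                     isHant = True
--                 break
--     return subtitleFile, isHant
-- ===== SOURCE B (Python) =====
-- def findSuitableSubtitle(vttFilesAboutThisVideo, videoID, isEng):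
--     ENSubtitilPriority = ['en', 'en-US', 'en-GB', 'en-CA', 'en-AU']
--     ZHSubtitilPriority = ['zh-CN', 'zh-Hans', 'zh', 'ZH-Hant', 'zh-HK', 'zh-TW']
--     patterns = [f'{videoID}.{tail}.vtt'
--                 for tail in (ENSubtitilPriority if isEng else ZHSubtitilPriority)]
--
--     # single pass: keep the file with the smallest priority rank (earliest file wins ties)
--     best = None  # (rank, file)
--     for file in vttFilesAboutThisVideo:
--         rank = next((i for i, p in enumerate(patterns) if p in file), None)
--         if rank is not None and (best is None or rank < best[0]):
--             best = (rank, file)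
--     if best is not None:
--         return best[1], (not isEng and best[0] >= 3)
--
--     # loose fallback
--     subtitleTail = 'en' if isEng else 'zh'
--     for file in vttFilesAboutThisVideo:
--         if f'{videoID}.{subtitleTail}' in file:
--             return file, (not isEng)
--     return None, False
-- ===== Notes on version B (the rewrite author's own statement) =====
-- stated objective: faster
-- what changed: Replaced the nested priority-by-priority rescans of the file list with one single pass over the files that keeps the candidate with the smallest precomputed priority rank (earliest file winning ties), deciding subtitle and isHant from that rank; the loose fallback is unchanged.
import Mathlib
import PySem

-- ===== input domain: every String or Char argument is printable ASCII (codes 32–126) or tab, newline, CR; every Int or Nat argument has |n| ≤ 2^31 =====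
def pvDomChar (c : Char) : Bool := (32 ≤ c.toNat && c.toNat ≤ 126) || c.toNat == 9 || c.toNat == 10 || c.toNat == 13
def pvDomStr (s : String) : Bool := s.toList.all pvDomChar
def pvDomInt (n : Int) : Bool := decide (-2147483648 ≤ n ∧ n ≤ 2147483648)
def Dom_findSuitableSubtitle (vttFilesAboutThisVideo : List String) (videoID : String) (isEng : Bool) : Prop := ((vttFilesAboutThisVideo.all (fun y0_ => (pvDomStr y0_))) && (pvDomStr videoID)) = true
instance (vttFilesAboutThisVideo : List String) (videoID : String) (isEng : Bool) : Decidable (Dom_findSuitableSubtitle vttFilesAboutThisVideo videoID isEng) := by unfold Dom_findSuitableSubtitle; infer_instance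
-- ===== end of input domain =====

-- B replaces A's priority-by-priority rescans of the file list with one single pass keeping the
-- best-ranked candidate (objective: faster by a constant factor, one pass instead of p passes).

-- ===== PORT A =====
-- inner `for file in …: if pattern in file: … break` loop of the strict phase
def pvFirstMatchA (pat : String) : List String → Option String
  | [] => none
  | file :: rest => if PySem.Str.isIn pat file then some file else pvFirstMatchA pat rest

-- outer `for subIndex, subTail in enumerate(subtitlePriority)` loop with its break
def pvStrictA (videoID : String) (isEng : Bool) (files : List String) :
    List (Int × String) → Option String × Bool
  | [] => (none, false)
  | (subIndex, subTail) :: rest =>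
    match pvFirstMatchA (videoID ++ "." ++ subTail ++ ".vtt") files with
    | some file => (some file, !isEng && decide (3 ≤ subIndex))
    | none => pvStrictA videoID isEng files rest

-- the loose (non-strict) fallback loop of A
def pvLooseA (videoID : String) (isEng : Bool) (subtitleTail : String) :
    List String → Option String × Bool
  | [] => (none, false)
  | file :: rest =>
    if PySem.Str.isIn (videoID ++ "." ++ subtitleTail) file then (some file, !isEng)
    else pvLooseA videoID isEng subtitleTail rest

def findSuitableSubtitle (vttFilesAboutThisVideo : List String) (videoID : String) (isEng : Bool) : Option String × Bool :=
  match pvStrictA videoID isEng vttFilesAboutThisVideo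
      (PySem.List.enumerate
        (if isEng then ["en", "en-US", "en-GB", "en-CA", "en-AU"]
         else ["zh-CN", "zh-Hans", "zh", "ZH-Hant", "zh-HK", "zh-TW"]) 0) with
  | (some file, isHant) => (some file, isHant)
  | (none, _) =>
    pvLooseA videoID isEng (if isEng then "en" else "zh") vttFilesAboutThisVideo

-- ===== PORT B =====
-- `next((i for i, p in enumerate(patterns) if p in file), None)`
def pvMinRankB (file : String) (k : Int) : List String → Option Int
  | [] => none
  | p :: ps => if PySem.Str.isIn p file then some k else pvMinRankB file (k + 1) ps

-- one step of B's single pass: keep the candidate with the strictly smaller rank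
def pvStepB (patterns : List String) (best : Option (Int × String)) (file : String) : Option (Int × String) :=
  match pvMinRankB file 0 patterns with
  | none => best
  | some r =>
    match best with
    | none => some (r, file)
    | some (br, bf) => if r < br then some (r, file) else some (br, bf)

-- B's loose fallback loop (returns directly from inside the loop)
def pvLooseB (pat : String) (isEng : Bool) : List String → Option String × Bool
  | [] => (none, false)
  | file :: rest => if PySem.Str.isIn pat file then (some file, !isEng) else pvLooseB pat isEng rest

def findSuitableSubtitle_alt (vttFilesAboutThisVideo : List String) (videoID : String) (isEng : Bool) : Option String × Bool :=
  match vttFilesAboutThisVideo.foldl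
      (pvStepB ((if isEng then ["en", "en-US", "en-GB", "en-CA", "en-AU"]
         else ["zh-CN", "zh-Hans", "zh", "ZH-Hant", "zh-HK", "zh-TW"]).map
        (fun tail => videoID ++ "." ++ tail ++ ".vtt"))) none with
  | some (r, file) => (some file, !isEng && decide (3 ≤ r))
  | none =>
    pvLooseB (videoID ++ "." ++ (if isEng then "en" else "zh")) isEng vttFilesAboutThisVideo

-- ===== PRECONDITION & SPEC =====
def Spec_findSuitableSubtitle (vttFilesAboutThisVideo : List String) (videoID : String) (isEng : Bool) (out : Option String × Bool) : Prop := out = findSuitableSubtitle_alt vttFilesAboutThisVideo videoID isEng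
instance (vttFilesAboutThisVideo : List String) (videoID : String) (isEng : Bool) (out : Option String × Bool) : Decidable (Spec_findSuitableSubtitle vttFilesAboutThisVideo videoID isEng out) := by unfold Spec_findSuitableSubtitle; infer_instance

-- ===== CLAIM (what is proved, stated in full; the proofs are below) =====
def Claim_equal_findSuitableSubtitle : Prop := ∀ (vttFilesAboutThisVideo : List String) (videoID : String) (isEng : Bool), Dom_findSuitableSubtitle vttFilesAboutThisVideo videoID isEng → Spec_findSuitableSubtitle vttFilesAboutThisVideo videoID isEng (findSuitableSubtitle vttFilesAboutThisVideo videoID isEng)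

-- ===== LEMMAS AND PROOFS =====

-- proof-side: the best (rank, file) candidate among `files`, smallest rank, earliest file on ties
def pvSpecMin (ps : List String) (k : Int) : List String → Option (Int × String)
  | [] => none
  | f :: rest =>
    match pvMinRankB f k ps, pvSpecMin ps k rest with
    | none, o => o
    | some r, none => some (r, f)
    | some r, some (r', f') => if r ≤ r' then some (r, f) else some (r', f')

-- left-biased merge of two candidates
def pvMerge : Option (Int × String) → Option (Int × String) → Option (Int × String)
  | none, o => o
  | some p, none => some p
  | some p, some q => if q.1 < p.1 then some q else some p

theorem pvMinRankB_ge (file : String) (ps : List String) (k r : Int)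
    (h : pvMinRankB file k ps = some r) : k ≤ r := by
  induction ps generalizing k with
  | nil => simp [pvMinRankB] at h
  | cons p ps ih =>
    by_cases hp : PySem.Str.isIn p file = true
    · simp only [pvMinRankB, if_pos hp, Option.some.injEq] at h; omega
    · simp only [pvMinRankB, if_neg hp] at h
      have := ih (k + 1) h; omega

theorem pvSpecMin_ge (ps : List String) (k : Int) (files : List String) (q : Int × String)
    (h : pvSpecMin ps k files = some q) : k ≤ q.1 := by
  induction files generalizing q with
  | nil => simp [pvSpecMin] at h
  | cons g rest ih =>
    simp only [pvSpecMin] at h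
    rcases hm : pvMinRankB g k ps with _ | rk <;>
      rcases hs : pvSpecMin ps k rest with _ | ⟨r', f'⟩ <;>
        simp only [hm, hs] at h
    · exact absurd h (by simp)
    · simp only [Option.some.injEq] at h
      subst h; exact ih _ hs
    · simp only [Option.some.injEq] at h
      subst h; exact pvMinRankB_ge _ _ _ _ hm
    · split at h <;> simp only [Option.some.injEq] at h <;> subst h
      · exact pvMinRankB_ge _ _ _ _ hm
      · exact ih _ hs

theorem pvSpecMin_nil_ps (k : Int) (files : List String) : pvSpecMin [] k files = none := by
  induction files with
  | nil => rfl
  | cons f rest ih => simp [pvSpecMin, pvMinRankB, ih]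

theorem pvSpecMin_cons_ps (p : String) (ps : List String) (k : Int) (files : List String) :
    pvSpecMin (p :: ps) k files =
      match pvFirstMatchA p files with
      | some f => some (k, f)
      | none => pvSpecMin ps (k + 1) files := by
  induction files with
  | nil => rfl
  | cons f rest ih =>
    by_cases hp : PySem.Str.isIn p f = true
    · simp only [pvSpecMin, pvMinRankB, pvFirstMatchA, hp, if_true, ih]
      rcases hs : pvSpecMin (p :: ps) k rest with _ | ⟨r', f'⟩
      · rw [ih] at hs
        rcases hm : pvFirstMatchA p rest with _ | g <;> rw [hm] at hs
        · rw [hs]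
        · exact absurd hs (by simp)
      · have hk : k ≤ r' := by
          rw [ih] at hs
          rcases hm : pvFirstMatchA p rest with _ | g <;> rw [hm] at hs
          · have := pvSpecMin_ge ps (k + 1) rest (r', f') hs; omega
          · simp only [Option.some.injEq, Prod.mk.injEq] at hs; omega
        rw [ih] at hs
        rcases hm : pvFirstMatchA p rest with _ | g <;> rw [hm] at hs <;> rw [hs] <;>
          simp [hk]
    · simp only [pvSpecMin, pvMinRankB, pvFirstMatchA, hp, ih]
      rcases hm : pvFirstMatchA p rest with _ | g
    -- no match for p in rest: both sides are pvSpecMin ps (k+1) (f :: rest)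
      · rfl
      · rcases hr : pvMinRankB f (k + 1) ps with _ | r
        · rfl
        · have h1 := pvMinRankB_ge f ps (k + 1) r hr
          have h2 : ¬ (r ≤ k) := by omega
          simp [h2]

theorem pvMerge_assoc (a b c : Option (Int × String)) :
    pvMerge (pvMerge a b) c = pvMerge a (pvMerge b c) := by
  rcases a with _ | a <;> rcases b with _ | b <;> rcases c with _ | c <;>
    simp only [pvMerge] <;> split_ifs <;> simp only [pvMerge] <;> split_ifs <;>
      first | rfl | omega

theorem pvStepB_eq_merge (ps : List String) (acc : Option (Int × String)) (file : String) :
    pvStepB ps acc file =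
      pvMerge acc ((pvMinRankB file 0 ps).map (fun r => (r, file))) := by
  rcases hm : pvMinRankB file 0 ps with _ | r <;>
    rcases acc with _ | ⟨br, bf⟩ <;> simp [pvStepB, pvMerge, hm]

theorem pvSpecMin_cons_file (ps : List String) (k : Int) (f : String) (rest : List String) :
    pvSpecMin ps k (f :: rest) =
      pvMerge ((pvMinRankB f k ps).map (fun r => (r, f))) (pvSpecMin ps k rest) := by
  rcases hm : pvMinRankB f k ps with _ | r <;>
    rcases hs : pvSpecMin ps k rest with _ | ⟨r', f'⟩ <;>
      simp only [pvSpecMin, pvMerge, hm, hs, Option.map_none, Option.map_some]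
  split_ifs <;> first | rfl | omega

theorem pvFoldl_eq_specMin (ps : List String) (files : List String) (acc : Option (Int × String)) :
    files.foldl (pvStepB ps) acc = pvMerge acc (pvSpecMin ps 0 files) := by
  induction files generalizing acc with
  | nil => rcases acc with _ | a <;> simp [pvSpecMin, pvMerge]
  | cons f rest ih =>
    simp only [List.foldl_cons, ih, pvStepB_eq_merge, pvSpecMin_cons_file, pvMerge_assoc]

theorem pvStrictA_eq_specMin (videoID : String) (isEng : Bool) (files : List String)
    (tails : List String) (k : Int) :
    pvStrictA videoID isEng files (PySem.List.enumerate tails k) =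
      match pvSpecMin (tails.map (fun tail => videoID ++ "." ++ tail ++ ".vtt")) k files with
      | some (r, f) => (some f, !isEng && decide (3 ≤ r))
      | none => (none, false) := by
  induction tails generalizing k with
  | nil => simp [PySem.List.enumerate_nil, pvStrictA, pvSpecMin_nil_ps]
  | cons t ts ih =>
    rw [PySem.List.enumerate_cons]
    simp only [pvStrictA, List.map_cons, pvSpecMin_cons_ps]
    rcases hm : pvFirstMatchA (videoID ++ "." ++ t ++ ".vtt") files with _ | f
    · simp only [ih]
    · rfl

theorem pvLooseA_eq_B (videoID : String) (isEng : Bool) (tail : String) (files : List String) :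
    pvLooseA videoID isEng tail files = pvLooseB (videoID ++ "." ++ tail) isEng files := by
  induction files with
  | nil => rfl
  | cons f rest ih => simp only [pvLooseA, pvLooseB, ih]

-- ===== VERDICT (by name: the statement is the Claim_ definition above) =====
theorem findSuitableSubtitle_spec : Claim_equal_findSuitableSubtitle := by
  intro files videoID isEng _
  unfold Spec_findSuitableSubtitle findSuitableSubtitle findSuitableSubtitle_alt
  rw [pvStrictA_eq_specMin, pvFoldl_eq_specMin]
  rcases hs : pvSpecMin ((if isEng then ["en", "en-US", "en-GB", "en-CA", "en-AU"]
      else ["zh-CN", "zh-Hans", "zh", "ZH-Hant", "zh-HK", "zh-TW"]).map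
        (fun tail => videoID ++ "." ++ tail ++ ".vtt")) 0 files with _ | ⟨r, f⟩
  · simp [pvMerge, pvLooseA_eq_B]
  · simp [pvMerge]
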